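-- pv_equiv track=rewrite | github.com/rot226/LoRaFlexSim-1.0.1 | article_c/common/plot_helpers.py | resolve_percentile_keys
-- ===== SOURCE A (Python) =====
-- def resolve_percentile_keys(
--     rows: list[dict[str, object]],
--     metric_key: str,
-- ) -> tuple[str, str | None, str | None]:
--     median_key = metric_key
--     lower_key = None
--     upper_key = None
--     if metric_key.endswith("_mean"):
--         base_key = metric_key[: -len("_mean")]
--         p10_key = f"{base_key}_p10"
--         p50_key = f"{base_key}_p50"
--         p90_key = f"{base_key}_p90"
--         if any(p50_key in row for row in rows):
--             median_key = p50_key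
--         if any(p10_key in row for row in rows) and any(p90_key in row for row in rows):
--             lower_key = p10_key
--             upper_key = p90_key
--     return median_key, lower_key, upper_key
-- ===== SOURCE B (Python) =====
-- def resolve_percentile_keys(rows, metric_key):
--     if not metric_key.endswith("_mean"):
--         return metric_key, None, None
--     base_key = metric_key[: -len("_mean")]
--     p10_key = base_key + "_p10"
--     p50_key = base_key + "_p50"
--     p90_key = base_key + "_p90"
--     has10 = has50 = has90 = False
--     for row in rows:
--         if has10 and has50 and has90:
--             break
--         has10 = has10 or p10_key in row
--         has50 = has50 or p50_key in row
--         has90 = has90 or p90_key in row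
--     median_key = p50_key if has50 else metric_key
--     if has10 and has90:
--         return median_key, p10_key, p90_key
--     return median_key, None, None
-- ===== Notes on version B (the rewrite author's own statement) =====
-- stated objective: alternative
-- what changed: B replaces A's three separate full any-scans over rows with a single fused pass that accumulates three presence flags and breaks early once all are found; non-'_mean' keys early-return.
import Mathlib
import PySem

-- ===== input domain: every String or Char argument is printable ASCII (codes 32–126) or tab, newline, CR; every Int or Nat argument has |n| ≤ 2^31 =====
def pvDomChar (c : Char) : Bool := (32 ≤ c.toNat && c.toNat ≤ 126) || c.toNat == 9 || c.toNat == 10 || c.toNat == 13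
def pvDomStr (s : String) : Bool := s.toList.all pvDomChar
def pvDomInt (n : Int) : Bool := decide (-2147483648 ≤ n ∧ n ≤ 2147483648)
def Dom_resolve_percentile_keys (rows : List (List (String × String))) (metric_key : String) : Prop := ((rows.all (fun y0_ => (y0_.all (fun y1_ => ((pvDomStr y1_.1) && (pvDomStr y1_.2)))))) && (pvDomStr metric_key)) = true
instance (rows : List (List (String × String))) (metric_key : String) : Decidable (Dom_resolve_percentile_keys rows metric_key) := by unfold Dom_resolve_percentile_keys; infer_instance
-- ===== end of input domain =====

-- B fuses A's three separate any-scans over rows into one pass accumulating three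
-- presence flags with an early break once all are found (alternative decomposition).

-- ===== PORT A =====
def resolve_percentile_keys (rows : List (List (String × String))) (metric_key : String) : String × Option String × Option String :=
  let median_key := metric_key
  let lower_key : Option String := none
  let upper_key : Option String := none
  if PySem.Str.endswith metric_key "_mean" then
    let base_key := PySem.Str.slice metric_key none (some (-5))
    let p10_key := base_key ++ "_p10"
    let p50_key := base_key ++ "_p50"
    let p90_key := base_key ++ "_p90"
    let median_key := if rows.any (fun row => row.any (fun kv => kv.1 == p50_key)) then p50_key else median_key
    if rows.any (fun row => row.any (fun kv => kv.1 == p10_key)) &&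
       rows.any (fun row => row.any (fun kv => kv.1 == p90_key)) then
      (median_key, some p10_key, some p90_key)
    else
      (median_key, lower_key, upper_key)
  else
    (median_key, lower_key, upper_key)

-- ===== PORT B =====
-- B's fused loop: one pass over rows updating (has10, has50, has90), breaking early
-- when all three flags are set (transliteration of Source B's for-loop with break).
def pvScanFlags (p10_key p50_key p90_key : String) :
    List (List (String × String)) → Bool × Bool × Bool → Bool × Bool × Bool
  | [], st => st
  | row :: rest, (h10, h50, h90) =>
    if h10 && h50 && h90 then (h10, h50, h90)
    else
      pvScanFlags p10_key p50_key p90_key rest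
        (h10 || row.any (fun kv => kv.1 == p10_key),
         h50 || row.any (fun kv => kv.1 == p50_key),
         h90 || row.any (fun kv => kv.1 == p90_key))

def resolve_percentile_keys_alt (rows : List (List (String × String))) (metric_key : String) : String × Option String × Option String :=
  if !(PySem.Str.endswith metric_key "_mean") then
    (metric_key, none, none)
  else
    let base_key := PySem.Str.slice metric_key none (some (-5))
    let p10_key := base_key ++ "_p10"
    let p50_key := base_key ++ "_p50"
    let p90_key := base_key ++ "_p90"
    let flags := pvScanFlags p10_key p50_key p90_key rows (false, false, false)
    let median_key := if flags.2.1 then p50_key else metric_key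
    if flags.1 && flags.2.2 then
      (median_key, some p10_key, some p90_key)
    else
      (median_key, none, none)

-- ===== PRECONDITION & SPEC =====
def Spec_resolve_percentile_keys (rows : List (List (String × String))) (metric_key : String) (out : String × Option String × Option String) : Prop := out = resolve_percentile_keys_alt rows metric_key
instance (rows : List (List (String × String))) (metric_key : String) (out : String × Option String × Option String) : Decidable (Spec_resolve_percentile_keys rows metric_key out) := by unfold Spec_resolve_percentile_keys; infer_instance

-- ===== CLAIM (what is proved, stated in full; the proofs are below) =====
def Claim_equal_resolve_percentile_keys : Prop := ∀ (rows : List (List (String × String))) (metric_key : String), Dom_resolve_percentile_keys rows metric_key → Spec_resolve_percentile_keys rows metric_key (resolve_percentile_keys rows metric_key)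

-- ===== LEMMAS AND PROOFS =====

-- the fused loop computes exactly the three any-scans (with early break absorbed by ||)
theorem pvScanFlags_eq (p10 p50 p90 : String) (rows : List (List (String × String)))
    (h10 h50 h90 : Bool) :
    pvScanFlags p10 p50 p90 rows (h10, h50, h90) =
      (h10 || rows.any (fun row => row.any (fun kv => kv.1 == p10)),
       h50 || rows.any (fun row => row.any (fun kv => kv.1 == p50)),
       h90 || rows.any (fun row => row.any (fun kv => kv.1 == p90))) := by
  induction rows generalizing h10 h50 h90 with
  | nil => simp [pvScanFlags]
  | cons r rs ih =>
    simp only [pvScanFlags, List.any_cons]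
    by_cases h : (h10 && h50 && h90) = true
    · obtain ⟨⟨e10, e50⟩, e90⟩ := by
        simpa [Bool.and_eq_true] using h
      simp [e10, e50, e90]
    · simp only [h, Bool.false_eq_true, if_false, ih]
      simp [Bool.or_assoc]

-- ===== VERDICT (by name: the statement is the Claim_ definition above) =====
theorem resolve_percentile_keys_spec : Claim_equal_resolve_percentile_keys := by
  intro rows metric_key _
  unfold Spec_resolve_percentile_keys resolve_percentile_keys resolve_percentile_keys_alt
  cases hc : PySem.Str.endswith metric_key "_mean" with
  | false => simp
  | true =>
    simp only [if_true]
    rw [pvScanFlags_eq]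
    simp only [Bool.false_or]
    rfl
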